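-- pv_equiv track=rewrite | github.com/maxaitel/overwatch-server-discord-bot | src/main.py | _format_role_distribution
-- ===== SOURCE A (Python) =====
-- def _format_role_distribution(role_counts: dict[str, int]) -> str:
--     if not role_counts:
--         return "None"
--     ordered_roles = ["tank", "dps", "support", "fill", "open"]
--     parts: list[str] = []
--     for role in ordered_roles:
--         count = role_counts.get(role)
--         if count:
--             parts.append(f"{role}:{count}")
--     for role, count in role_counts.items():
--         if role not in ordered_roles:
--             parts.append(f"{role}:{count}")
--     return ", ".join(parts) if parts else "None"
-- ===== SOURCE B (Python) =====
-- def _format_role_distribution(role_counts: dict[str, int]) -> str: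
--     order = {"tank": 0, "dps": 1, "support": 2, "fill": 3, "open": 4}
--     rows = []
--     for role, count in role_counts.items():
--         if role in order and not count:
--             continue
--         rows.append((order.get(role, 5), role, count))
--     rows.sort(key=lambda t: t[0])
--     return ", ".join(f"{role}:{count}" for _, role, count in rows) if rows else "None"
-- ===== Notes on version B (the rewrite author's own statement) =====
-- stated objective: alternative
-- what changed: A makes two passes (a fixed-order scan with dict lookups, then an items() scan for extras); B makes a single pass over items() tagging each kept pair with an order index (5 for extras) and stable-sorts by that index before joining.
import Mathlib
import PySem

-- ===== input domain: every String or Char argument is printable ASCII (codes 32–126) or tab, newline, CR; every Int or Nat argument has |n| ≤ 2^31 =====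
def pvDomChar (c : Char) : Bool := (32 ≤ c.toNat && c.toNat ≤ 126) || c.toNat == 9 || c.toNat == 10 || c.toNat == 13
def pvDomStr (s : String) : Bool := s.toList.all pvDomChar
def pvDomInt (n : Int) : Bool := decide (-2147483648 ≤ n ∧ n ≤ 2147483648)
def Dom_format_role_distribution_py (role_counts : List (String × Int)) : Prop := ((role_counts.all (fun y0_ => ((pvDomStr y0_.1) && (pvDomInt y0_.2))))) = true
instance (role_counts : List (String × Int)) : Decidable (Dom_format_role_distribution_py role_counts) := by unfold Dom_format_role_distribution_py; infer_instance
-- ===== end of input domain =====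

-- ===== PORT A =====
-- B replaces A's two passes (fixed-order lookup scan, then an extras scan) by one tagged pass
-- over the items and a stable sort by order index (objective: alternative; same return value).

-- f"{role}:{count}" (shared formatting helper; the f-string both sources use)
def pvFmt (role : String) (count : Int) : String :=
  PySem.Str.join "" [role, ":", PySem.Int.toStr count]

def pvGetRC (role_counts : List (String × Int)) (role : String) : Option Int :=
  (role_counts.find? (fun rc => rc.1 == role)).map (·.2)

def format_role_distribution_py (role_counts : List (String × Int)) : String :=
  if role_counts = [] then "None" else
  let ordered : List String := ["tank", "dps", "support", "fill", "open"]
  let parts : List String := ordered.foldl (fun parts role =>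
      match pvGetRC role_counts role with
      | some count => if count ≠ 0 then parts ++ [pvFmt role count] else parts
      | none => parts) []
  let parts : List String := role_counts.foldl (fun parts rc =>
      if rc.1 ∉ ordered then parts ++ [pvFmt rc.1 rc.2] else parts) parts
  if parts = [] then "None" else PySem.Str.join ", " parts

def pvOrder : PySem.Dict String Int :=
  PySem.Dict.ofList [("tank", 0), ("dps", 1), ("support", 2), ("fill", 3), ("open", 4)]

def format_role_distribution_py_alt (role_counts : List (String × Int)) : String :=
  let rows : List (Int × String × Int) := role_counts.foldl (fun rows rc =>
      if pvOrder.contains rc.1 ∧ rc.2 = 0 then rows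
      else rows ++ [(pvOrder.getD rc.1 5, rc.1, rc.2)]) []
  let rows := PySem.List.sorted rows (fun t => t.1) false
  if rows = [] then "None"
  else PySem.Str.join ", " (rows.map (fun t => pvFmt t.2.1 t.2.2))

-- ===== PRECONDITION & SPEC =====
-- Pre_ excludes association lists with duplicate keys: they cannot arise from a Python dict
-- (the parameter's type), and on them the assoc-list reading of dict lookup/iteration is ambiguous.
def Pre_format_role_distribution_py (role_counts : List (String × Int)) : Prop :=
  (role_counts.map Prod.fst).Nodup
instance (role_counts : List (String × Int)) : Decidable (Pre_format_role_distribution_py role_counts) := by unfold Pre_format_role_distribution_py; infer_instance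

def pvWitness_format_role_distribution_py : (List (String × Int)) :=
  [("x", 0), ("tank", 2), ("open", 0), ("zz", 1)]

def Spec_format_role_distribution_py (role_counts : List (String × Int)) (out : String) : Prop := out = format_role_distribution_py_alt role_counts
instance (role_counts : List (String × Int)) (out : String) : Decidable (Spec_format_role_distribution_py role_counts out) := by unfold Spec_format_role_distribution_py; infer_instance

-- ===== CLAIM (what is proved, stated in full; the proofs are below) =====
def Claim_equal_format_role_distribution_py : Prop := ∀ (role_counts : List (String × Int)), Dom_format_role_distribution_py role_counts → Pre_format_role_distribution_py role_counts → Spec_format_role_distribution_py role_counts (format_role_distribution_py role_counts)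

-- ===== LEMMAS AND PROOFS =====


lemma pv_insertBy_append (before : (Int × String × Int) → (Int × String × Int) → Bool)
    (x : Int × String × Int) (L1 L2 : List (Int × String × Int))
    (h : ∀ y ∈ L1, before x y = false) :
    PySem.List.insertBy before x (L1 ++ L2) = L1 ++ PySem.List.insertBy before x L2 := by
  induction L1 with
  | nil => rfl
  | cons y ys ih =>
      simp only [List.cons_append, PySem.List.insertBy, h y (by simp)]
      simp only [Bool.false_eq_true, if_false, List.cons.injEq, true_and]
      exact ih (fun z hz => h z (by simp [hz]))

lemma pv_insertBy_all (before : (Int × String × Int) → (Int × String × Int) → Bool)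
    (x : Int × String × Int) (L : List (Int × String × Int))
    (h : ∀ y ∈ L, before x y = true) :
    PySem.List.insertBy before x L = x :: L := by
  cases L with
  | nil => rfl
  | cons y ys => simp [PySem.List.insertBy, h y (by simp)]

def pvBuckets (ks : List Int) (xs : List (Int × String × Int)) : List (Int × String × Int) :=
  ks.flatMap (fun k => xs.filter (fun x => x.1 == k))

lemma pv_buckets_append_not_mem (ks : List Int) (xs : List (Int × String × Int))
    (x : Int × String × Int) (hx : x.1 ∉ ks) :
    pvBuckets ks (xs ++ [x]) = pvBuckets ks xs := by
  induction ks with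
  | nil => rfl
  | cons k ks ih =>
      have hk : ¬ (x.1 == k) = true := by simp; intro h; exact hx (by simp [h])
      have : pvBuckets (k :: ks) (xs ++ [x]) = (xs ++ [x]).filter (fun y => y.1 == k) ++ pvBuckets ks (xs ++ [x]) := by simp [pvBuckets]
      rw [this, ih (fun h => hx (by simp [h]))]
      simp [pvBuckets, List.filter_append, hk]

lemma pv_insertBy_buckets (ks : List Int) (xs : List (Int × String × Int))
    (x : Int × String × Int) (hks : ks.Pairwise (· < ·)) (hx : x.1 ∈ ks) :
    PySem.List.insertBy (fun a b => decide (a.1 < b.1)) x (pvBuckets ks xs)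
      = pvBuckets ks (xs ++ [x]) := by
  induction ks with
  | nil => simp at hx
  | cons k ks ih =>
      have hlt : ∀ k' ∈ ks, k < k' := (List.pairwise_cons.mp hks).1
      by_cases hk : x.1 = k
      · rw [show pvBuckets (k :: ks) xs = xs.filter (fun y => y.1 == k) ++ pvBuckets ks xs from by simp [pvBuckets]]
        rw [pv_insertBy_append _ _ _ _ (by
          intro y hy
          have := List.of_mem_filter hy
          simp at this
          simp [hk, this])]
        rw [pv_insertBy_all _ _ _ (by
          intro y hy
          have hy1 : ∃ k' ∈ ks, y.1 = k' := by
            unfold pvBuckets at hy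
            simp only [List.mem_flatMap] at hy
            obtain ⟨k', hk', hmem⟩ := hy
            have := List.of_mem_filter hmem
            simp at this
            exact ⟨k', hk', this⟩
          obtain ⟨k', hk', hy1⟩ := hy1
          simp [hk, hy1]
          exact hlt k' hk')]
        have hnotin : x.1 ∉ ks := by
          intro hmem; exact absurd (hlt _ hmem) (by simp [hk])
        rw [show pvBuckets (k :: ks) (xs ++ [x]) = (xs ++ [x]).filter (fun y => y.1 == k) ++ pvBuckets ks (xs ++ [x]) from by simp [pvBuckets]]
        rw [pv_buckets_append_not_mem _ _ _ hnotin]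
        simp [List.filter_append, hk]
      · have hx' : x.1 ∈ ks := by
          rcases List.mem_cons.mp hx with h | h
          · exact absurd h hk
          · exact h
        have hkx : k < x.1 := hlt _ hx'
        rw [show pvBuckets (k :: ks) xs = xs.filter (fun y => y.1 == k) ++ pvBuckets ks xs from by simp [pvBuckets]]
        rw [pv_insertBy_append _ _ _ _ (by
          intro y hy
          have := List.of_mem_filter hy
          simp at this
          simp [this]
          omega)]
        rw [ih (List.pairwise_cons.mp hks).2 hx']
        rw [show pvBuckets (k :: ks) (xs ++ [x]) = (xs ++ [x]).filter (fun y => y.1 == k) ++ pvBuckets ks (xs ++ [x]) from by simp [pvBuckets]]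
        simp [List.filter_append, show ¬ (x.1 == k) = true by simp; omega]

lemma pv_sorted_buckets (ks : List Int) (xs : List (Int × String × Int))
    (hks : ks.Pairwise (· < ·)) (hxs : ∀ y ∈ xs, y.1 ∈ ks) :
    PySem.List.sorted xs (fun t => t.1) false = pvBuckets ks xs := by
  induction xs using List.reverseRecOn with
  | nil => simp [PySem.List.sorted, pvBuckets]
  | append_singleton xs x ih =>
      have h1 : PySem.List.sorted (xs ++ [x]) (fun t => t.1) false
          = PySem.List.insertBy (fun a b => decide (a.1 < b.1)) x (PySem.List.sorted xs (fun t => t.1) false) := by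
        simp [PySem.List.sorted, List.foldl_append]
      rw [h1, ih (fun y hy => hxs y (by simp [hy]))]
      exact pv_insertBy_buckets ks xs x hks (hxs x (by simp))

-- Dict characterisations
lemma pv_order_get? (r : String) : pvOrder.get? r = if r = "tank" then some 0 else if r = "dps" then some 1 else if r = "support" then some 2 else if r = "fill" then some 3 else if r = "open" then some 4 else none := by
  rw [show pvOrder = PySem.Dict.mk [("tank", 0), ("dps", 1), ("support", 2), ("fill", 3), ("open", 4)] from rfl]
  rw [PySem.Dict.get?_mk_cons, PySem.Dict.get?_mk_cons, PySem.Dict.get?_mk_cons,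
      PySem.Dict.get?_mk_cons, PySem.Dict.get?_mk_cons]
  by_cases h1 : r = "tank" <;> by_cases h2 : r = "dps" <;> by_cases h3 : r = "support" <;>
    by_cases h4 : r = "fill" <;> by_cases h5 : r = "open" <;>
    simp_all [PySem.Dict.get?]
  rw [if_neg (fun h => h1 h.symm), if_neg (fun h => h2 h.symm), if_neg (fun h => h3 h.symm),
      if_neg (fun h => h4 h.symm), if_neg (fun h => h5 h.symm)]

lemma pv_order_getD (r : String) : pvOrder.getD r 5 = if r = "tank" then 0 else if r = "dps" then 1 else if r = "support" then 2 else if r = "fill" then 3 else if r = "open" then 4 else 5 := by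
  simp only [PySem.Dict.getD, pv_order_get?]; split_ifs <;> rfl

lemma pv_order_contains (r : String) : pvOrder.contains r = decide (r ∈ ["tank","dps","support","fill","open"]) := by
  rw [show pvOrder = PySem.Dict.mk [("tank", 0), ("dps", 1), ("support", 2), ("fill", 3), ("open", 4)] from rfl]
  rw [PySem.Dict.contains_mk]
  by_cases h1 : r = "tank" <;> by_cases h2 : r = "dps" <;> by_cases h3 : r = "support" <;>
    by_cases h4 : r = "fill" <;> by_cases h5 : r = "open" <;>
    simp_all
  exact ⟨fun h => h1 h.symm, fun h => h2 h.symm, fun h => h3 h.symm, fun h => h4 h.symm, fun h => h5 h.symm⟩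

-- abbreviations for the two programs' intermediate data
def pvF (rc : String × Int) : Int × String × Int := (pvOrder.getD rc.1 5, rc.1, rc.2)
def pvKeep (rc : String × Int) : Bool := decide (¬ (pvOrder.contains rc.1 = true ∧ rc.2 = 0))
def pvRows (l : List (String × Int)) : List (Int × String × Int) := (l.filter pvKeep).map pvF
def pvG (l : List (String × Int)) (role : String) : List String :=
  match pvGetRC l role with
  | some count => if count ≠ 0 then [pvFmt role count] else []
  | none => []
def pvOrdered : List String := ["tank", "dps", "support", "fill", "open"]
def pvFmt2 (t : Int × String × Int) : String := pvFmt t.2.1 t.2.2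

-- the B-side loop builds pvRows
lemma pv_rows_eq (l : List (String × Int)) :
    l.foldl (fun rows rc =>
      if pvOrder.contains rc.1 ∧ rc.2 = 0 then rows
      else rows ++ [(pvOrder.getD rc.1 5, rc.1, rc.2)]) [] = pvRows l := by
  rw [PySem.List.foldl_congr_mem _ _
      (fun rows rc => if ¬ (pvOrder.contains rc.1 = true ∧ rc.2 = 0) then rows ++ [pvF rc] else rows) _
      (by intro acc rc _; by_cases hc : pvOrder.contains rc.1 = true ∧ rc.2 = 0 <;> simp [hc, pvF])]
  rw [PySem.List.foldl_append_ite _ pvF l []]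
  rfl

-- the A-side first loop is a flatMap of per-role pieces
lemma pv_parts1_eq (l : List (String × Int)) :
    pvOrdered.foldl (fun parts role =>
      match pvGetRC l role with
      | some count => if count ≠ 0 then parts ++ [pvFmt role count] else parts
      | none => parts) [] = pvOrdered.flatMap (pvG l) := by
  rw [PySem.List.foldl_congr_mem _ _ (fun parts role => parts ++ pvG l role) _
      (by
        intro acc r _
        unfold pvG
        cases h : pvGetRC l r with
        | none => simp [h]
        | some c => by_cases hc : c ≠ 0 <;> simp [h, hc])]
  rw [PySem.List.foldl_append_eq_flatMap]
  simp

-- with distinct keys, filtering on one key is the first match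
lemma pv_filter_key (l : List (String × Int)) (r : String) (h : (l.map Prod.fst).Nodup) :
    l.filter (fun rc => rc.1 == r) = (l.find? (fun rc => rc.1 == r)).toList := by
  induction l with
  | nil => rfl
  | cons rc l ih =>
      simp only [List.map_cons, List.nodup_cons] at h
      by_cases hr : rc.1 = r
      · have hnil : l.filter (fun rc => rc.1 == r) = [] := by
          rw [List.filter_eq_nil_iff]
          intro a ha hba
          simp only [beq_iff_eq] at hba
          apply h.1
          rw [hr, ← hba]
          exact List.mem_map_of_mem ha
        simp [List.filter_cons, List.find?_cons, hr, hnil]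
      · simp [List.filter_cons, List.find?_cons, hr, ih h.2]

-- ordered-role bucket k holds exactly A's entry for role r
lemma pv_bucket_ord (l : List (String × Int)) (h : (l.map Prod.fst).Nodup)
    (k : Int) (r : String)
    (hgd : ∀ s : String, pvOrder.getD s 5 = k ↔ s = r)
    (hc : pvOrder.contains r = true) :
    ((pvRows l).filter (fun t => t.1 == k)).map pvFmt2 = pvG l r := by
  unfold pvRows
  rw [List.filter_map, List.filter_filter, List.map_map]
  rw [List.filter_congr (q := fun rc => rc.1 == r && !(rc.2 == 0)) (by
    intro rc _
    by_cases hr : rc.1 = r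
    · subst hr
      simp [Function.comp, pvF, pvKeep, (hgd rc.1).mpr rfl, hc]
      by_cases h0 : rc.2 = 0 <;> simp [h0]
    · have hgk : (pvOrder.getD rc.1 5 == k) = false := by
        simp only [beq_eq_false_iff_ne, ne_eq]
        exact fun hh => hr ((hgd rc.1).mp hh)
      have hrr : (rc.1 == r) = false := by simp [hr]
      simp [Function.comp, pvF, hgk, hrr])]
  rw [show (fun rc : String × Int => rc.1 == r && !(rc.2 == 0))
        = (fun rc : String × Int => !(rc.2 == 0) && (rc.1 == r)) from by funext rc; rw [Bool.and_comm]]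
  rw [← List.filter_filter, pv_filter_key l r h]
  unfold pvG pvGetRC
  cases hf : l.find? (fun rc => rc.1 == r) with
  | none => simp
  | some rc0 =>
      have hr0 : rc0.1 = r := by simpa using List.find?_some hf
      by_cases h0 : rc0.2 = 0 <;> simp [Option.toList, List.filter_cons, h0, pvFmt2, pvF, hr0]

-- bucket 5 holds exactly A's extras
lemma pv_bucket_ext (l : List (String × Int)) :
    ((pvRows l).filter (fun t => t.1 == 5)).map pvFmt2
      = (l.filter (fun rc => decide (rc.1 ∉ pvOrdered))).map (fun rc => pvFmt rc.1 rc.2) := by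
  unfold pvRows
  rw [List.filter_map, List.filter_filter, List.map_map]
  rw [List.filter_congr (q := fun rc => decide (rc.1 ∉ pvOrdered)) (by
    intro rc _
    by_cases hm : rc.1 ∈ pvOrdered
    · have hne : ¬ pvOrder.getD rc.1 5 = 5 := by
        rw [pv_order_getD]
        simp only [pvOrdered, List.mem_cons, List.not_mem_nil, or_false] at hm
        rcases hm with h|h|h|h|h <;> rw [h] <;> decide
      have hgk : (pvOrder.getD rc.1 5 == (5:Int)) = false := by
        simp only [beq_eq_false_iff_ne, ne_eq]; exact hne
      simp [Function.comp, pvF, hgk, hm]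
    · simp only [pvOrdered, List.mem_cons, List.not_mem_nil, or_false, not_or] at hm
      have h5 : pvOrder.getD rc.1 5 = 5 := by
        rw [pv_order_getD]
        simp [hm.1, hm.2.1, hm.2.2.1, hm.2.2.2.1, hm.2.2.2.2]
      have hcf : pvOrder.contains rc.1 = false := by
        rw [pv_order_contains]
        simp [hm.1, hm.2.1, hm.2.2.1, hm.2.2.2.1, hm.2.2.2.2]
      have hm' : rc.1 ∉ pvOrdered := by
        simp [pvOrdered, hm.1, hm.2.1, hm.2.2.1, hm.2.2.2.1, hm.2.2.2.2]
      simp [Function.comp, pvF, pvKeep, h5, hcf, hm'])]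
  simp [Function.comp, pvFmt2, pvF]

-- keys of pvRows lie in [0..5]
lemma pv_rows_keys (l : List (String × Int)) : ∀ y ∈ pvRows l, y.1 ∈ [(0:Int),1,2,3,4,5] := by
  intro y hy
  unfold pvRows at hy
  obtain ⟨rc, _, rfl⟩ := List.mem_map.mp hy
  simp only [pvF, pv_order_getD]
  split_ifs <;> simp

lemma pv_main (l : List (String × Int)) (h : (l.map Prod.fst).Nodup) :
    format_role_distribution_py l = format_role_distribution_py_alt l := by
  by_cases hl : l = []
  · subst hl; rfl
  have hb0 := pv_bucket_ord l h 0 "tank" (by intro s; rw [pv_order_getD]; split_ifs <;> simp_all) (by rw [pv_order_contains]; decide)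
  have hb1 := pv_bucket_ord l h 1 "dps" (by intro s; rw [pv_order_getD]; split_ifs <;> simp_all) (by rw [pv_order_contains]; decide)
  have hb2 := pv_bucket_ord l h 2 "support" (by intro s; rw [pv_order_getD]; split_ifs <;> simp_all) (by rw [pv_order_contains]; decide)
  have hb3 := pv_bucket_ord l h 3 "fill" (by intro s; rw [pv_order_getD]; split_ifs <;> simp_all) (by rw [pv_order_contains]; decide)
  have hb4 := pv_bucket_ord l h 4 "open" (by intro s; rw [pv_order_getD]; split_ifs <;> simp_all) (by rw [pv_order_contains]; decide)
  have hbe := pv_bucket_ext l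
  have hmap : (pvBuckets [(0:Int),1,2,3,4,5] (pvRows l)).map pvFmt2
      = pvOrdered.flatMap (pvG l)
        ++ (l.filter (fun rc => decide (rc.1 ∉ pvOrdered))).map (fun rc => pvFmt rc.1 rc.2) := by
    rw [show pvBuckets [(0:Int),1,2,3,4,5] (pvRows l)
        = (pvRows l).filter (fun t => t.1 == 0) ++ ((pvRows l).filter (fun t => t.1 == 1)
          ++ ((pvRows l).filter (fun t => t.1 == 2) ++ ((pvRows l).filter (fun t => t.1 == 3)
          ++ ((pvRows l).filter (fun t => t.1 == 4) ++ (pvRows l).filter (fun t => t.1 == 5)))))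
        from by simp [pvBuckets]]
    simp only [List.map_append]
    rw [hb0, hb1, hb2, hb3, hb4, hbe]
    simp [pvOrdered]
  unfold format_role_distribution_py format_role_distribution_py_alt
  simp only [if_neg hl]
  rw [pv_rows_eq]
  rw [pv_sorted_buckets [(0:Int),1,2,3,4,5] (pvRows l) (by decide) (pv_rows_keys l)]
  rw [show (["tank", "dps", "support", "fill", "open"] : List String) = pvOrdered from rfl]
  rw [pv_parts1_eq l]
  rw [PySem.List.foldl_append_ite (fun rc : String × Int => rc.1 ∉ pvOrdered)
      (fun rc : String × Int => pvFmt rc.1 rc.2) l _]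
  rw [show (fun t : Int × String × Int => pvFmt t.2.1 t.2.2) = pvFmt2 from rfl, ← hmap]
  by_cases hB : pvBuckets [(0:Int),1,2,3,4,5] (pvRows l) = [] <;>
    simp [hB, List.map_eq_nil_iff]

-- ===== VERDICT (by name: the statement is the Claim_ definition above) =====
theorem format_role_distribution_py_spec : Claim_equal_format_role_distribution_py := by
  intro role_counts _ hpre
  unfold Spec_format_role_distribution_py
  exact pv_main role_counts hpre
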